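-- pv_equiv track=rewrite | github.com/MathsIsNotFun/Maths | hasse divise dynamic.py | build_unified_hasse_edges
-- ===== SOURCE A (Python) =====
-- def build_unified_hasse_edges(elements):
--     """Build edges for unified Hasse diagram"""
--     edges = []
--     elements_sorted = sorted(elements)
--
--     for a in elements_sorted:
--         for b in elements_sorted:
--             if b < a and a % b == 0:
--                 is_cover = True
--                 for c in elements_sorted:
--                     if b < c < a and a % c == 0 and c % b == 0:
--                         is_cover = False
--                         break
--                 if is_cover:
--                     edges.append((b, a))
--
--     return edges
-- ===== SOURCE B (Python) =====
-- def build_unified_hasse_edges(elements):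
--     """Transitive reduction of the divisibility DAG: build each element's
--     strict-divisor adjacency list once (a dict), then a cover edge (b, a) is
--     an adjacency pair not reachable in two steps, i.e. b is in no divs[c]
--     with c in divs[a]; no modulo arithmetic in the reduction step."""
--     s = sorted(elements)
--     divs = {}
--     for a in s:
--         divs[a] = [b for b in s if b < a and a % b == 0]
--     edges = []
--     for a in s:
--         blocked = set()
--         for c in divs[a]:
--             blocked.update(divs[c])
--         edges += [(b, a) for b in divs[a] if b not in blocked]
--     return edges
-- ===== Notes on version B (the rewrite author's own statement) =====
-- stated objective: alternative
-- what changed: A decides each candidate edge by a fresh inner scan of the whole list with modulo tests for an intermediate element; B instead builds the divisibility DAG's adjacency lists once in a dict and computes the Hasse edges as the graph's transitive reduction: an edge (b,a) is kept iff b is not two-step reachable (b in divs[c] for some c in divs[a]), a set-union/membership step with no arithmetic.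
import Mathlib
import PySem

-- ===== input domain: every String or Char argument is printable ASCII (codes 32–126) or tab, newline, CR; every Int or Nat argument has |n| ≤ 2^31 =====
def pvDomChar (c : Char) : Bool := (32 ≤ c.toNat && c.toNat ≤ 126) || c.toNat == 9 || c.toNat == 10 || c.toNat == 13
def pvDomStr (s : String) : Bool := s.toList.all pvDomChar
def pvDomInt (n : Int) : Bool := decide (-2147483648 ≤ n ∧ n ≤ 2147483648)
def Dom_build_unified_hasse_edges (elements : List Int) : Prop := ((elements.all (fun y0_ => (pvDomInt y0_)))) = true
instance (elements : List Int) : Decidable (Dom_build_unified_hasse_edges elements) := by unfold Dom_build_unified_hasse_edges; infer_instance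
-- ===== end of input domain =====

-- B builds the divisibility DAG's adjacency lists once and computes Hasse edges as its
-- transitive reduction (drop pairs reachable in two steps via set membership), instead of
-- A's fresh modulo-scan of the whole list per candidate pair (objective: alternative).

-- ===== PORT A =====
def build_unified_hasse_edges (elements : List Int) : List (List Int) :=
  let s := PySem.List.sorted elements (fun x => x) false
  s.foldl (fun edges a =>
    s.foldl (fun edges b =>
      if b < a ∧ PySem.Int.mod a b = 0 then
        if s.any (fun c => decide (b < c ∧ c < a ∧ PySem.Int.mod a c = 0 ∧ PySem.Int.mod c b = 0)) then
          edges
        else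
          edges ++ [[b, a]]
      else edges) edges) []

-- ===== PORT B =====
def build_unified_hasse_edges_alt (elements : List Int) : List (List Int) :=
  let s := PySem.List.sorted elements (fun x => x) false
  let divs : PySem.Dict Int (List Int) :=
    s.foldl (fun d a =>
      d.insert a (s.filter (fun b => decide (b < a ∧ PySem.Int.mod a b = 0)))) PySem.Dict.empty
  s.foldl (fun edges a =>
    let blocked : PySem.Set Int :=
      (divs.getD a []).foldl (fun st c => PySem.Set.update st (divs.getD c [])) PySem.Set.empty
    edges ++ ((divs.getD a []).filter (fun b => !(PySem.Set.contains blocked b))).map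
      (fun b => [b, a])) []

-- ===== PRECONDITION & SPEC =====
-- Pre_ excludes exactly the inputs on which Python A raises ZeroDivisionError:
-- lists containing 0 together with some positive element (then b = 0 < a reaches a % 0).
def Pre_build_unified_hasse_edges (elements : List Int) : Prop :=
  ¬ ((0 : Int) ∈ elements ∧ ∃ a ∈ elements, 0 < a)
instance (elements : List Int) : Decidable (Pre_build_unified_hasse_edges elements) := by
  unfold Pre_build_unified_hasse_edges; infer_instance

def pvWitness_build_unified_hasse_edges : List Int := [1, 2, 3, 4, 6, 12]

def Spec_build_unified_hasse_edges (elements : List Int) (out : List (List Int)) : Prop := out = build_unified_hasse_edges_alt elements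
instance (elements : List Int) (out : List (List Int)) : Decidable (Spec_build_unified_hasse_edges elements out) := by unfold Spec_build_unified_hasse_edges; infer_instance

-- ===== CLAIM (what is proved, stated in full; the proofs are below) =====
def Claim_equal_build_unified_hasse_edges : Prop := ∀ (elements : List Int), Dom_build_unified_hasse_edges elements → Pre_build_unified_hasse_edges elements → Spec_build_unified_hasse_edges elements (build_unified_hasse_edges elements)

-- ===== LEMMAS AND PROOFS =====

-- the strict-divisor list of a within s (what B stores under key a)
def pvD (s : List Int) (a : Int) : List Int :=
  s.filter (fun b => decide (b < a ∧ PySem.Int.mod a b = 0))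

-- the dict built by B maps every key it saw to its divisor list
theorem pv_getD_foldl_insert (l : List Int) (s : List Int) (d : PySem.Dict Int (List Int))
    (k : Int) :
    (l.foldl (fun d a => d.insert a (pvD s a)) d).getD k []
      = if k ∈ l then pvD s k else d.getD k [] := by
  induction l generalizing d with
  | nil => simp
  | cons a t ih =>
      simp only [List.foldl_cons, ih, PySem.Dict.getD_insert, List.mem_cons]
      by_cases h1 : k ∈ t <;> by_cases h2 : k = a <;> simp [h1, h2]

-- membership in the blocked set built by B's update loop
theorem pv_mem_fold_update (l : List Int) (g : Int → List Int) (st : PySem.Set Int) (x : Int) :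
    x ∈ l.foldl (fun st c => PySem.Set.update st (g c)) st ↔ x ∈ st ∨ ∃ c ∈ l, x ∈ g c := by
  induction l generalizing st with
  | nil => simp
  | cons a t ih =>
      simp only [List.foldl_cons, ih, PySem.Set.mem_update, List.mem_cons]
      constructor
      · rintro ((h | h) | ⟨c, hc, hx⟩)
        · exact Or.inl h
        · exact Or.inr ⟨a, Or.inl rfl, h⟩
        · exact Or.inr ⟨c, Or.inr hc, hx⟩
      · rintro (h | ⟨c, (rfl | hc), hx⟩)
        · exact Or.inl (Or.inl h)
        · exact Or.inl (Or.inr hx)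
        · exact Or.inr ⟨c, hc, hx⟩

-- A's inner c-scan over the whole list equals "b is two-step reachable" over divisor lists,
-- for b already known to lie in s.
theorem pv_any_eq (s : List Int) (a b : Int) (hb : b ∈ s) :
    s.any (fun c => decide (b < c ∧ c < a ∧ PySem.Int.mod a c = 0 ∧ PySem.Int.mod c b = 0))
      = decide (∃ c ∈ pvD s a, b ∈ pvD s c) := by
  rw [Bool.eq_iff_iff]
  simp only [List.any_eq_true, pvD, List.mem_filter, decide_eq_true_eq]
  constructor
  · rintro ⟨c, hc, h1, h2, h3, h4⟩
    exact ⟨c, ⟨hc, h2, h3⟩, hb, h1, h4⟩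
  · rintro ⟨c, ⟨hc, hca⟩, _, hbc⟩
    exact ⟨c, hc, hbc.1, hca.1, hca.2, hbc.2⟩

-- A's per-a inner loop written as a filter of the divisor list
theorem pv_inner_eq (s : List Int) (a : Int) (edges : List (List Int)) :
    s.foldl (fun edges b =>
      if b < a ∧ PySem.Int.mod a b = 0 then
        if s.any (fun c => decide (b < c ∧ c < a ∧ PySem.Int.mod a c = 0 ∧ PySem.Int.mod c b = 0)) then
          edges
        else
          edges ++ [[b, a]]
      else edges) edges
    = edges ++ ((pvD s a).filter (fun b =>
        !(s.any (fun c => decide (b < c ∧ c < a ∧ PySem.Int.mod a c = 0 ∧ PySem.Int.mod c b = 0))))).map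
        (fun b => [b, a]) := by
  have hstep : (fun (edges : List (List Int)) (b : Int) =>
      if b < a ∧ PySem.Int.mod a b = 0 then
        if s.any (fun c => decide (b < c ∧ c < a ∧ PySem.Int.mod a c = 0 ∧ PySem.Int.mod c b = 0)) then
          edges
        else
          edges ++ [[b, a]]
      else edges)
    = (fun (edges : List (List Int)) (b : Int) =>
      if (decide (b < a ∧ PySem.Int.mod a b = 0) &&
          !(s.any (fun c => decide (b < c ∧ c < a ∧ PySem.Int.mod a c = 0 ∧ PySem.Int.mod c b = 0)))) = true then
        edges ++ [[b, a]] else edges) := by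
    funext edges b
    by_cases hp : b < a ∧ PySem.Int.mod a b = 0
    · rw [if_pos hp]
      by_cases hq : (s.any fun c => decide (b < c ∧ c < a ∧ PySem.Int.mod a c = 0 ∧ PySem.Int.mod c b = 0)) = true
      · rw [if_pos hq, hq]; simp [hp]
      · rw [if_neg hq]
        simp only [Bool.not_eq_true] at hq
        rw [hq]; simp [hp]
    · rw [if_neg hp]; simp [hp]
  rw [hstep, PySem.List.foldl_append_if, pvD, List.filter_filter]
  congr 1
  congr 1
  apply List.filter_congr
  intro b _
  by_cases hp : b < a ∧ PySem.Int.mod a b = 0 <;> simp [hp]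

-- ===== VERDICT (by name: the statement is the Claim_ definition above) =====
theorem build_unified_hasse_edges_spec : Claim_equal_build_unified_hasse_edges := by
  intro elements _ _
  unfold Spec_build_unified_hasse_edges build_unified_hasse_edges build_unified_hasse_edges_alt
  show _ = (PySem.List.sorted elements (fun x => x) false).foldl _ []
  generalize PySem.List.sorted elements (fun x => x) false = s
  have hdict : ∀ k ∈ s,
      (s.foldl (fun d a =>
        d.insert a (s.filter (fun b => decide (b < a ∧ PySem.Int.mod a b = 0)))) PySem.Dict.empty).getD k []
        = pvD s k := by
    intro k hk
    simpa [pvD, hk] using pv_getD_foldl_insert s s PySem.Dict.empty k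
  apply PySem.List.foldl_congr_mem
  intro edges a ha
  rw [pv_inner_eq s a edges]
  simp only [hdict a ha]
  congr 1
  have hblocked :
      ((pvD s a).foldl (fun st c => PySem.Set.update st
        ((s.foldl (fun d a =>
          d.insert a (s.filter (fun b => decide (b < a ∧ PySem.Int.mod a b = 0)))) PySem.Dict.empty).getD c []))
        PySem.Set.empty)
      = (pvD s a).foldl (fun st c => PySem.Set.update st (pvD s c)) PySem.Set.empty := by
    apply PySem.List.foldl_congr_mem
    intro st c hc
    rw [hdict c (List.mem_filter.mp hc).1]
  rw [hblocked]
  refine (List.filter_congr ?_) ▸ rfl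
  intro b hb
  have hbs : b ∈ s := (List.mem_filter.mp hb).1
  rw [pv_any_eq s a b hbs]
  have hmem := pv_mem_fold_update (pvD s a) (pvD s) PySem.Set.empty b
  simp only [PySem.Set.empty, List.not_mem_nil, false_or] at hmem
  simp [PySem.Set.contains_eq_listContains, hmem]
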